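-- pv_equiv track=rewrite | github.com/thob97/uni_fu_alp2 | u3/U3.py | same_average
-- ===== SOURCE A (Python) =====
-- def same_average (xs): #T(n)= c + n+n+1+n*log n + n + (1-n)*(c + n - 1) => O n^2
--     avg = (sum(xs) // len(xs))                      #n+n+1 wobei n laenge der Liste xs
--     xs = sorted (xs)                                #O n*log n  wobei n laenge der Liste xs
--     liste = []                                      #c
--     while(xs!=[] and len(xs)!=1):                   #n+n-1 wobei n laenge der Liste xs
--         current = (xs[0]+xs[-1])//2                 #c
-- #print ("main",avg,current, xs[0],xs[-1])
--         if (current > avg):                         #c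
--             xs = xs[:-1]                            #c
--         elif (current < avg):                       #c
--             xs = xs[1:]                             #c
--         else:
--             liste.append ((xs[0],xs[-1]))           #c
--             for x in xs[1:]:                        #n-1
-- #print ("sup",avg,(x+xs[-1])//2), x,xs[-1])
--                 if (((x+xs[-1])//2) ==avg):         #c
--                     liste.append ((x,xs[-1]))       #c
--                 else:
--                     break
--             xs = xs[:-1]                            #c
--     return liste                                    #c
-- ===== SOURCE B (Python) =====
-- def same_average(xs):
--     # Two-pointer version: the window A keeps as a sliced copy is tracked by
--     # index pointers (i, j) into the sorted array instead.
--     avg = sum(xs) // len(xs)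
--     a = sorted(xs)
--     out = []
--     i, j = 0, len(a) - 1
--     while i < j:
--         m = (a[i] + a[j]) // 2
--         if m > avg:
--             j -= 1
--         elif m < avg:
--             i += 1
--         else:
--             out.append((a[i], a[j]))
--             k = i + 1
--             while k <= j and (a[k] + a[j]) // 2 == avg:
--                 out.append((a[k], a[j]))
--                 k += 1
--             j -= 1
--     return out
-- ===== Notes on version B (the rewrite author's own statement) =====
-- stated objective: alternative
-- what changed: Replaces A's while-loop over ever-smaller sliced copies of the sorted list with two index pointers (i, j) into the sorted array, so each shrink step moves a pointer instead of building a new list.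
import Mathlib
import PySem

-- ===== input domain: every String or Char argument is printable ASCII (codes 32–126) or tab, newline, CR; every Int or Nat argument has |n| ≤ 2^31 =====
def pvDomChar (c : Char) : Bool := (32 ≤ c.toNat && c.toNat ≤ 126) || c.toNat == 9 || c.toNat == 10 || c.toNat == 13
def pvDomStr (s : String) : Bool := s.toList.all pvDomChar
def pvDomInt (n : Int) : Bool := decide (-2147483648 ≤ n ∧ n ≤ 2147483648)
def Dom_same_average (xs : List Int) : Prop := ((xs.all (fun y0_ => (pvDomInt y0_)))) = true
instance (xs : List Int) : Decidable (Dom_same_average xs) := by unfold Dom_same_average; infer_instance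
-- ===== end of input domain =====

-- B replaces A's repeated list slicing with two index pointers (i, j) into the sorted array; same values, different traversal mechanics.


-- ===== PORT A =====
-- inner 'for x in xs[1:]: if (x+xs[-1])//2 == avg: append else break'
def sameAvgInnerA (ys : List Int) (last avg : Int) (acc : List (Int × Int)) : List (Int × Int) :=
  match ys with
  | [] => acc
  | x :: t =>
      if PySem.Int.floordiv (x + last) 2 = avg then sameAvgInnerA t last avg (acc ++ [(x, last)])
      else acc

-- the while loop, totalised by a fuel argument (each step shortens xs by one, so fuel = length suffices
-- and the fuel never runs out on the call below); xs[0] / xs[-1] via pyGetD (the guard guarantees xs ≠ [])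
def sameAvgLoopA : Nat → List Int → Int → List (Int × Int) → List (Int × Int)
  | 0, _, _, acc => acc
  | fuel + 1, xs, avg, acc =>
    if xs ≠ [] ∧ xs.length ≠ 1 then
      let first := PySem.List.pyGetD xs 0 0
      let last := PySem.List.pyGetD xs (-1) 0
      let current := PySem.Int.floordiv (first + last) 2
      if current > avg then sameAvgLoopA fuel (PySem.List.slice xs none (some (-1))) avg acc
      else if current < avg then sameAvgLoopA fuel (PySem.List.slice xs (some 1) none) avg acc
      else sameAvgLoopA fuel (PySem.List.slice xs none (some (-1))) avg
             (sameAvgInnerA (PySem.List.slice xs (some 1) none) last avg (acc ++ [(first, last)]))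
    else acc

-- avg = sum(xs)//len(xs): Python raises ZeroDivisionError for xs = [], excluded by Pre_
def same_average (xs : List Int) : List (Int × Int) :=
  let avg := PySem.Int.floordiv xs.sum xs.length
  let a := PySem.List.sorted xs (fun x => x) false
  sameAvgLoopA a.length a avg []

-- ===== PORT B =====
-- inner 'while k <= j and (a[k]+a[j])//2 == avg'; indices are nonnegative and in range, ported as Nat
-- with getD; totalised by fuel (k grows towards j, fuel = a.length suffices at the call site)
def sameAvgInnerB (a : List Int) (last avg : Int) : Nat → Nat → Nat → List (Int × Int) → List (Int × Int)
  | 0, _, _, acc => acc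
  | fuel + 1, k, j, acc =>
    if k ≤ j ∧ PySem.Int.floordiv (a.getD k 0 + last) 2 = avg then
      sameAvgInnerB a last avg fuel (k + 1) j (acc ++ [(a.getD k 0, last)])
    else acc

-- 'while i < j' over the two pointers, totalised by fuel (j - i shrinks each step, fuel = a.length suffices)
def sameAvgLoopB (a : List Int) (avg : Int) : Nat → Nat → Nat → List (Int × Int) → List (Int × Int)
  | 0, _, _, acc => acc
  | fuel + 1, i, j, acc =>
    if i < j then
      let m := PySem.Int.floordiv (a.getD i 0 + a.getD j 0) 2
      if m > avg then sameAvgLoopB a avg fuel i (j - 1) acc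
      else if m < avg then sameAvgLoopB a avg fuel (i + 1) j acc
      else sameAvgLoopB a avg fuel i (j - 1)
             (sameAvgInnerB a (a.getD j 0) avg a.length (i + 1) j (acc ++ [(a.getD i 0, a.getD j 0)]))
    else acc

def same_average_alt (xs : List Int) : List (Int × Int) :=
  let avg := PySem.Int.floordiv xs.sum xs.length
  let a := PySem.List.sorted xs (fun x => x) false
  sameAvgLoopB a avg a.length 0 (a.length - 1) []

-- ===== PRECONDITION & SPEC =====
-- Pre_ excludes only the empty list, on which A (and B) raise ZeroDivisionError at sum(xs)//len(xs)
def Pre_same_average (xs : List Int) : Prop := xs ≠ []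
instance (xs : List Int) : Decidable (Pre_same_average xs) := by unfold Pre_same_average; infer_instance
def pvWitness_same_average : List Int := ([1, 2, 3, 4])

def Spec_same_average (xs : List Int) (out : List (Int × Int)) : Prop := out = same_average_alt xs
instance (xs : List Int) (out : List (Int × Int)) : Decidable (Spec_same_average xs out) := by unfold Spec_same_average; infer_instance

-- ===== CLAIM (what is proved, stated in full; the proofs are below) =====
def Claim_equal_same_average : Prop := ∀ (xs : List Int), Dom_same_average xs → Pre_same_average xs → Spec_same_average xs (same_average xs)

-- ===== LEMMAS AND PROOFS =====

-- A's working list after some steps is the window a[i..j] of the sorted array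
def sameAvgSeg (a : List Int) (i j : Nat) : List Int := (a.take (j + 1)).drop i

lemma sameAvgSeg_length (a : List Int) (i j : Nat) (hj : j < a.length) :
    (sameAvgSeg a i j).length = j + 1 - i := by
  simp [sameAvgSeg]; omega

lemma sameAvgSeg_cons (a : List Int) (i j : Nat) (hij : i ≤ j) (hj : j < a.length) :
    sameAvgSeg a i j = a.getD i 0 :: sameAvgSeg a (i + 1) j := by
  have h1 : i < (a.take (j + 1)).length := by simp; omega
  have := List.drop_eq_getElem_cons h1
  simp only [sameAvgSeg]
  rw [this]
  congr 1
  rw [List.getElem_take]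
  simp [List.getD, List.getElem?_eq_getElem (by omega : i < a.length)]

lemma sameAvgSeg_nil (a : List Int) (i j : Nat) (h : j + 1 ≤ i) :
    sameAvgSeg a i j = [] := by
  apply List.drop_eq_nil_of_le
  simp; omega

lemma sameAvgSeg_snoc (a : List Int) (i j : Nat) (hij : i ≤ j) (hj : j < a.length) :
    sameAvgSeg a i j = (a.take j).drop i ++ [a.getD j 0] := by
  simp only [sameAvgSeg]
  rw [List.take_add_one, List.drop_append_of_le_length (by simp; omega)]
  simp [List.getElem?_eq_getElem hj, List.getD]

lemma sameAvgSeg_getD_head (a : List Int) (i j : Nat) (hij : i ≤ j) (hj : j < a.length) :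
    (sameAvgSeg a i j).getD 0 0 = a.getD i 0 := by
  rw [sameAvgSeg_cons a i j hij hj]; rfl

lemma sameAvgSeg_getLast (a : List Int) (i j : Nat) (hij : i ≤ j) (hj : j < a.length) :
    PySem.List.pyGetD (sameAvgSeg a i j) (-1) 0 = a.getD j 0 := by
  rw [sameAvgSeg_snoc a i j hij hj, PySem.List.pyGetD_neg_one_append_singleton]

lemma sameAvgSeg_tail (a : List Int) (i j : Nat) (hij : i ≤ j) (hj : j < a.length) :
    (sameAvgSeg a i j).tail = sameAvgSeg a (i + 1) j := by
  rw [sameAvgSeg_cons a i j hij hj, List.tail_cons]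

lemma sameAvgSeg_dropLast (a : List Int) (i j : Nat) (hij : i ≤ j) (hj : j < a.length)
    (hj1 : 1 ≤ j) : (sameAvgSeg a i j).dropLast = sameAvgSeg a i (j - 1) := by
  rw [sameAvgSeg_snoc a i j hij hj, List.dropLast_concat]
  have : j - 1 + 1 = j := by omega
  simp only [sameAvgSeg, this]

lemma sameAvgInner_eq (a : List Int) (last avg : Int) (j : Nat) (hj : j < a.length) :
    ∀ (f k : Nat) (acc : List (Int × Int)), j + 1 - k ≤ f →
      sameAvgInnerA (sameAvgSeg a k j) last avg acc = sameAvgInnerB a last avg f k j acc := by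
  intro f
  induction f with
  | zero =>
    intro k acc hf
    rw [sameAvgSeg_nil a k j (by omega), sameAvgInnerA, sameAvgInnerB]
  | succ f ih =>
    intro k acc hf
    by_cases hkj : k ≤ j
    · rw [sameAvgSeg_cons a k j hkj hj, sameAvgInnerA, sameAvgInnerB]
      by_cases hc : PySem.Int.floordiv (a.getD k 0 + last) 2 = avg
      · rw [if_pos hc, if_pos ⟨hkj, hc⟩]
        exact ih (k + 1) _ (by omega)
      · rw [if_neg hc, if_neg (fun h => hc h.2)]
    · rw [sameAvgSeg_nil a k j (by omega), sameAvgInnerA, sameAvgInnerB,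
          if_neg (fun h => hkj h.1)]

lemma sameAvgLoopA_stop (a : List Int) (avg : Int) (fA i j : Nat) (acc : List (Int × Int))
    (hj : j < a.length) (hij : ¬ i < j) :
    sameAvgLoopA fA (sameAvgSeg a i j) avg acc = acc := by
  cases fA with
  | zero => rw [sameAvgLoopA]
  | succ f =>
    rw [sameAvgLoopA, if_neg]
    intro ⟨h1, h2⟩
    have hl := sameAvgSeg_length a i j hj
    have h0 : (sameAvgSeg a i j).length ≠ 0 := fun h => h1 (List.eq_nil_of_length_eq_zero h)
    omega

lemma sameAvgLoop_eq (a : List Int) (avg : Int) :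
    ∀ (fB fA i j : Nat) (acc : List (Int × Int)), j < a.length → j - i ≤ fB → j + 1 - i ≤ fA →
      sameAvgLoopA fA (sameAvgSeg a i j) avg acc = sameAvgLoopB a avg fB i j acc := by
  intro fB
  induction fB with
  | zero =>
    intro fA i j acc hj hB _hA
    rw [sameAvgLoopB]
    exact sameAvgLoopA_stop a avg fA i j acc hj (by omega)
  | succ fB ih =>
    intro fA i j acc hj hB hA
    by_cases hij : i < j
    · cases fA with
      | zero =>
        exfalso
        have hl := sameAvgSeg_length a i j hj
        omega
      | succ fA =>
        rw [sameAvgLoopA, sameAvgLoopB, if_pos hij, if_pos]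
        · simp only [PySem.List.pyGetD_zero, sameAvgSeg_getD_head a i j (by omega) hj,
            sameAvgSeg_getLast a i j (by omega) hj,
            PySem.List.slice_to_neg_one, PySem.List.slice_from_one,
            sameAvgSeg_dropLast a i j (by omega) hj (by omega),
            sameAvgSeg_tail a i j (by omega) hj]
          split_ifs with h1 h2
          · exact ih fA i (j - 1) acc (by omega) (by omega) (by omega)
          · exact ih fA (i + 1) j acc hj (by omega) (by omega)
          · rw [sameAvgInner_eq a _ avg j hj a.length (i + 1) _ (by omega)]
            exact ih fA i (j - 1) _ (by omega) (by omega) (by omega)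
        · constructor
          · intro h
            have hl := sameAvgSeg_length a i j hj
            rw [h] at hl; simp at hl; omega
          · rw [sameAvgSeg_length a i j hj]; omega
    · rw [sameAvgLoopB, if_neg hij]
      exact sameAvgLoopA_stop a avg fA i j acc hj hij

lemma sameAvgSeg_full (a : List Int) (h : a ≠ []) : sameAvgSeg a 0 (a.length - 1) = a := by
  have : a.length - 1 + 1 = a.length := by
    have := List.length_pos_iff.mpr h; omega
  simp [sameAvgSeg, this]

-- ===== VERDICT (by name: the statement is the Claim_ definition above) =====
theorem same_average_spec : Claim_equal_same_average := by
  intro xs _ hpre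
  unfold Spec_same_average same_average same_average_alt
  have hne : PySem.List.sorted xs (fun x => x) false ≠ [] := by
    rw [Ne, PySem.List.sorted_eq_nil_iff]; exact hpre
  have hlen : 0 < (PySem.List.sorted xs (fun x => x) false).length :=
    List.length_pos_iff.mpr hne
  have h := sameAvgLoop_eq (PySem.List.sorted xs (fun x => x) false)
    (PySem.Int.floordiv xs.sum xs.length)
    (PySem.List.sorted xs (fun x => x) false).length
    (PySem.List.sorted xs (fun x => x) false).length
    0 ((PySem.List.sorted xs (fun x => x) false).length - 1) []
    (by omega) (by omega) (by omega)
  rw [sameAvgSeg_full _ hne] at h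
  exact h
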